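-- pv_equiv track=rewrite | github.com/DTU-Nanolab-materials-discovery/nomad-dtu-nanolab-plugin | src/nomad_dtu_nanolab_plugin/rtp_log_reader.py | _segment_label_ordinals
-- ===== SOURCE A (Python) =====
-- ORDINAL_SECOND = 2
--
-- ORDINAL_THIRD = 3
--
-- def _segment_label_ordinals(base_names: list[str]) -> list[str]:
--     """Add ordinal prefixes (2nd, 3rd, …) only when the same base name repeats.
--
--     The first occurrence keeps the plain name; later ones become "2nd X", "3rd X", …
--     """
--
--     def _ordinal(n: int) -> str:
--         if n == ORDINAL_SECOND:
--             return '2nd'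
--         if n == ORDINAL_THIRD:
--             return '3rd'
--         return f'{n}th'
--
--     name_count: dict[str, int] = {}
--     for bn in base_names:
--         name_count[bn] = name_count.get(bn, 0) + 1
--
--     name_seen: dict[str, int] = {}
--     final: list[str] = []
--     for bn in base_names:
--         if name_count[bn] == 1:
--             final.append(bn)
--         else:
--             name_seen[bn] = name_seen.get(bn, 0) + 1
--             n = name_seen[bn]
--             final.append(f'{_ordinal(n)} {bn}' if n > 1 else bn)
--     return final
-- ===== SOURCE B (Python) =====
-- def _segment_label_ordinals(base_names: list[str]) -> list[str]:
--     """Group the indices of each base name once, then write the labels by group: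
--     the first index of a group gets the plain name, the later ones get
--     '<ordinal(rank)> name' for rank = 2, 3, ...
--     """
--
--     def _ordinal(n: int) -> str:
--         if n == 2:
--             return '2nd'
--         if n == 3:
--             return '3rd'
--         return f'{n}th'
--
--     groups: dict[str, list[int]] = {}
--     for i, bn in enumerate(base_names):
--         groups.setdefault(bn, []).append(i)
--
--     result = [''] * len(base_names)
--     for bn, idxs in groups.items():
--         result[idxs[0]] = bn
--         for rank, i in enumerate(idxs[1:], start=2):
--             result[i] = f'{_ordinal(rank)} {bn}'
--     return result
-- ===== Notes on version B (the rewrite author's own statement) =====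
-- stated objective: alternative
-- what changed: Replaces A's two in-order scans with a count dict and a running seen dict by a single index-grouping dict (name -> list of positions) and a write of the labels into a preallocated result list, group by group.
import Mathlib
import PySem

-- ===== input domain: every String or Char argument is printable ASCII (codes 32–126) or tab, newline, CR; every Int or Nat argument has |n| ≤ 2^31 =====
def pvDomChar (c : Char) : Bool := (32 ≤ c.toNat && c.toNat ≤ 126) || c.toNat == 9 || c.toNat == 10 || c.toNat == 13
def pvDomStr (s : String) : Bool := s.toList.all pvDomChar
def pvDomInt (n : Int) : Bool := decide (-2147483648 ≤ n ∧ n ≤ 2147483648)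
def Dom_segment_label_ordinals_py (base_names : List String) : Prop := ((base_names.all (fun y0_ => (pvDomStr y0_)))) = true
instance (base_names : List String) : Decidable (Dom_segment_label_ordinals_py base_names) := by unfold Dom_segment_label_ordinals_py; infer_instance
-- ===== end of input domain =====

-- B replaces A's count-dict pass plus seen-dict scan by one index-grouping dict and
-- a write of the labels into a preallocated result, group by group (objective: alternative).

-- shared helper: both Pythons define the identical nested _ordinal
def pyOrdinal (n : Int) : String :=
  if n = 2 then "2nd" else if n = 3 then "3rd" else PySem.Int.toStr n ++ "th"

-- ===== PORT A =====
def segment_label_ordinals_py (base_names : List String) : List String :=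
  let name_count : PySem.Dict String Int :=
    base_names.foldl (fun d bn => d.insert bn (d.getD bn 0 + 1)) PySem.Dict.empty
  -- name_count[bn] cannot raise (bn was just counted), so getD is exact here
  (base_names.foldl (fun (st : PySem.Dict String Int × List String) bn =>
      if name_count.getD bn 0 = 1 then (st.1, st.2 ++ [bn])
      else
        let seen := st.1.insert bn (st.1.getD bn 0 + 1)
        let n := seen.getD bn 0
        (seen, st.2 ++ [if n > 1 then pyOrdinal n ++ " " ++ bn else bn]))
    (PySem.Dict.empty, [])).2

-- ===== PORT B =====
def segment_label_ordinals_py_alt (base_names : List String) : List String :=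
  -- groups.setdefault(bn, []).append(i) appends i to groups[bn] (default []): Dict.modify is exact
  let groups : PySem.Dict String (List Int) :=
    (PySem.List.enumerate base_names).foldl
      (fun d p => d.modify p.2 [] (· ++ [p.1])) PySem.Dict.empty
  groups.items.foldl
    (fun res g =>
      -- result[idxs[0]] = bn: every group is nonempty by construction, so the .getD default is never read;
      -- all stored indices are nonnegative and in range, so result[i] = v is exactly List.set i.toNat v
      let res1 := res.set ((PySem.List.pyGet? g.2 0).getD 0).toNat g.1
      -- for rank, i in enumerate(idxs[1:], start=2): result[i] = f'{_ordinal(rank)} {bn}'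
      (PySem.List.enumerate (PySem.List.slice g.2 (some 1) none) 2).foldl
        (fun r q => r.set q.2.toNat (pyOrdinal q.1 ++ " " ++ g.1)) res1)
    (List.replicate base_names.length "")

-- ===== PRECONDITION & SPEC =====
def Spec_segment_label_ordinals_py (base_names : List String) (out : List String) : Prop := out = segment_label_ordinals_py_alt base_names
instance (base_names : List String) (out : List String) : Decidable (Spec_segment_label_ordinals_py base_names out) := by unfold Spec_segment_label_ordinals_py; infer_instance

-- ===== CLAIM (what is proved, stated in full; the proofs are below) =====
def Claim_equal_segment_label_ordinals_py : Prop := ∀ (base_names : List String), Dom_segment_label_ordinals_py base_names → Spec_segment_label_ordinals_py base_names (segment_label_ordinals_py base_names)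

-- ===== LEMMAS AND PROOFS =====

-- the common label of an occurrence of bn preceded by pref
def pvLabel (pref : List String) (bn : String) : String :=
  if pref.count bn = 0 then bn else pyOrdinal ((pref.count bn : Int) + 1) ++ " " ++ bn

def pvLabelGo : List String → List String → List String
  | _, [] => []
  | pref, bn :: rest => pvLabel pref bn :: pvLabelGo (pref ++ [bn]) rest

-- ---------- A-side: the two-dict loop produces pvLabelGo ----------

theorem pvLoopA (full : List String) (rest : List String) :
    ∀ (pref : List String) (seen : PySem.Dict String Int) (acc : List String),
    full = pref ++ rest →
    (∀ bn, full.count bn ≠ 1 → seen.getD bn 0 = (pref.count bn : Int)) →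
    (rest.foldl (fun (st : PySem.Dict String Int × List String) bn =>
      if ((full.foldl (fun d bn => d.insert bn (d.getD bn 0 + 1))
            (PySem.Dict.empty : PySem.Dict String Int)).getD bn 0) = 1
      then (st.1, st.2 ++ [bn])
      else (st.1.insert bn (st.1.getD bn 0 + 1),
            st.2 ++ [if (st.1.insert bn (st.1.getD bn 0 + 1)).getD bn 0 > 1
                     then pyOrdinal ((st.1.insert bn (st.1.getD bn 0 + 1)).getD bn 0) ++ " " ++ bn
                     else bn]))
      (seen, acc)).2 = acc ++ pvLabelGo pref rest := by
  induction rest with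
  | nil => intro pref seen acc _ _; simp [pvLabelGo]
  | cons bn rest ih =>
    intro pref seen acc hfull hseen
    have hcnt : ((full.foldl (fun d bn => d.insert bn (d.getD bn 0 + 1))
        (PySem.Dict.empty : PySem.Dict String Int)).getD bn 0) = (full.count bn : Int) := by
      rw [PySem.Dict.getD_foldl_insert_add_one]; simp
    simp only [List.foldl_cons]
    by_cases h1 : full.count bn = 1
    · -- count == 1: pref contains no bn, so the label is the plain bn
      have hpref0 : pref.count bn = 0 := by
        have h := h1
        rw [hfull, List.count_append, List.count_cons_self] at h
        omega
      rw [if_pos (by rw [hcnt, h1]; rfl)]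
      rw [ih (pref ++ [bn]) seen (acc ++ [bn]) (by simp [hfull]) ?_]
      · simp [pvLabelGo, pvLabel, hpref0]
      · intro bn' hbn'
        have hne : bn' ≠ bn := fun h => hbn' (h ▸ h1)
        rw [List.count_append]
        simp [Ne.symm hne, hseen bn' hbn']
    · rw [if_neg (by rw [hcnt]; exact_mod_cast fun h => h1 (by exact_mod_cast h))]
      have hsbn : seen.getD bn 0 = (pref.count bn : Int) := hseen bn h1
      have hins : (seen.insert bn (seen.getD bn 0 + 1)).getD bn 0 = (pref.count bn : Int) + 1 := by
        rw [PySem.Dict.getD_insert]; simp [hsbn]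
      have hx : (if (seen.insert bn (seen.getD bn 0 + 1)).getD bn 0 > 1
                 then pyOrdinal ((seen.insert bn (seen.getD bn 0 + 1)).getD bn 0) ++ " " ++ bn
                 else bn) = pvLabel pref bn := by
        rw [hins]
        by_cases h0 : pref.count bn = 0
        · simp [pvLabel, h0]
        · have hgt : ((pref.count bn : Int) + 1) > 1 := by
            have : 1 ≤ pref.count bn := Nat.one_le_iff_ne_zero.mpr h0
            exact_mod_cast by omega
          simp [pvLabel, h0, hgt]
      rw [hx, ih (pref ++ [bn]) _ _ (by simp [hfull]) ?_]
      · simp [pvLabelGo]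
      · intro bn' hbn'
        rw [PySem.Dict.getD_insert]
        by_cases he : bn' = bn
        · subst he
          rw [if_pos rfl, hsbn, List.count_append]
          simp
        · rw [if_neg he, hseen bn' hbn', List.count_append]
          simp [Ne.symm he]

theorem pvLabelGo_map (full : List String) (rest : List String) :
    ∀ (pref : List String), full = pref ++ rest →
    pvLabelGo pref rest = (PySem.List.enumerate rest (pref.length : Int)).map
      (fun p => pvLabel (full.take p.1.toNat) p.2) := by
  induction rest with
  | nil => intro pref _; simp [pvLabelGo, PySem.List.enumerate_nil]
  | cons bn rest ih =>
    intro pref hfull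
    rw [PySem.List.enumerate_cons, List.map_cons]
    simp only [pvLabelGo]
    have htake : full.take (pref.length : Int).toNat = pref := by
      rw [Int.toNat_natCast, hfull, List.take_left]
    congr 1
    · rw [htake]
    · have hlen : (pref.length : Int) + 1 = (((pref ++ [bn]).length : Nat) : Int) := by simp
      rw [hlen]
      exact ih (pref ++ [bn]) (by simp [hfull])

theorem pvA_eq_map (xs : List String) :
    segment_label_ordinals_py xs = (PySem.List.enumerate xs).map
      (fun p => pvLabel (xs.take p.1.toNat) p.2) := by
  simp only [segment_label_ordinals_py]
  rw [pvLoopA xs xs [] PySem.Dict.empty [] rfl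
      (by intro bn _; simp [PySem.Dict.getD, PySem.Dict.get?, PySem.Dict.empty])]
  rw [List.nil_append, pvLabelGo_map xs xs [] rfl]
  norm_num

-- ---------- B-side: scatter-write machinery ----------

def pvWrites (ps : List (Nat × String)) (res : List String) : List String :=
  ps.foldl (fun r q => r.set q.1 q.2) res

def pvGW (g : String × List Int) : List (Nat × String) :=
  (((PySem.List.pyGet? g.2 0).getD 0).toNat, g.1) ::
    (PySem.List.enumerate g.2.tail 2).map (fun q => (q.2.toNat, pyOrdinal q.1 ++ " " ++ g.1))

def pvIdx (xs : List String) (bn : String) : List Int :=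
  ((PySem.List.enumerate xs).filter (fun p => p.2 == bn)).map (·.1)

theorem pvWrites_length (ps : List (Nat × String)) : ∀ res, (pvWrites ps res).length = res.length := by
  induction ps with
  | nil => intro res; rfl
  | cons q ps ih => intro res; simp only [pvWrites, List.foldl_cons] at *; rw [ih]; simp

theorem pvWrites_getElem?_not_mem (ps : List (Nat × String)) :
    ∀ (res : List String) (j : Nat), j ∉ ps.map (·.1) → (pvWrites ps res)[j]? = res[j]? := by
  induction ps with
  | nil => intro res j _; rfl
  | cons q ps ih =>
    intro res j h
    simp only [List.map_cons, List.mem_cons] at h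
    rw [not_or] at h
    simp only [pvWrites, List.foldl_cons] at *
    rw [ih _ j h.2, List.getElem?_set_ne (Ne.symm h.1)]

theorem pvWrites_getElem?_inc (ps : List (Nat × String)) :
    ∀ (m : Nat) (j : Nat) (v : String) (res : List String),
    (ps.map (·.1)).Pairwise (· < ·) → ps[m]? = some (j, v) → j < res.length →
    (pvWrites ps res)[j]? = some v := by
  induction ps with
  | nil => intro m j v res _ hm _; simp at hm
  | cons q ps ih =>
    intro m j v res hp hm hj
    obtain ⟨a, w⟩ := q
    simp only [List.map_cons, List.pairwise_cons] at hp
    rw [show pvWrites ((a, w) :: ps) res = pvWrites ps (res.set a w) from rfl]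
    match m with
    | 0 =>
      simp only [List.getElem?_cons_zero, Option.some.injEq, Prod.mk.injEq] at hm
      rw [pvWrites_getElem?_not_mem ps _ j ?_]
      · rw [hm.1, hm.2, List.getElem?_set_self hj]
      · intro hmem
        have h2 := hp.1 j hmem
        rw [hm.1] at h2
        exact absurd h2 (lt_irrefl j)
    | Nat.succ m =>
      simp only [List.getElem?_cons_succ] at hm
      exact ih m j v _ hp.2 hm (by simpa using hj)

theorem pvFold_length (G : List (String × List Int)) :
    ∀ res, (G.foldl (fun res g => pvWrites (pvGW g) res) res).length = res.length := by
  induction G with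
  | nil => intro res; rfl
  | cons g G ih => intro res; simp only [List.foldl_cons]; rw [ih, pvWrites_length]

theorem pvFold_skip (G : List (String × List Int)) :
    ∀ (res : List String) (j : Nat), (∀ g ∈ G, j ∉ (pvGW g).map (·.1)) →
    (G.foldl (fun res g => pvWrites (pvGW g) res) res)[j]? = res[j]? := by
  induction G with
  | nil => intro res j _; rfl
  | cons g G ih =>
    intro res j h
    simp only [List.foldl_cons]
    rw [ih _ j (fun g hg => h g (List.mem_cons_of_mem _ hg)),
        pvWrites_getElem?_not_mem _ _ j (h g (List.mem_cons_self))]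

theorem pvIdx_nonneg (xs : List String) (bn : String) (i : Int) (h : i ∈ pvIdx xs bn) : 0 ≤ i := by
  unfold pvIdx at h
  obtain ⟨p, hp, rfl⟩ := List.mem_map.mp h
  obtain ⟨k, _, rfl⟩ := (PySem.List.mem_enumerate_iff _ _ _).mp (List.mem_of_mem_filter hp)
  simp

theorem pvIdx_pairwise (xs : List String) (bn : String) : (pvIdx xs bn).Pairwise (· < ·) := by
  unfold pvIdx
  exact List.pairwise_map.mpr ((PySem.List.pairwise_lt_enumerate xs 0).filter _)

theorem pvIdx_length (xs : List String) (bn : String) : (pvIdx xs bn).length = xs.count bn := by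
  unfold pvIdx
  rw [List.length_map, ← List.countP_eq_length_filter]
  conv_rhs => rw [← PySem.List.map_snd_enumerate xs 0]
  rw [List.count, List.countP_map]
  rfl

theorem pvIdx_getElem? (xs : List String) (bn : String) (m : Nat) (j : Int)
    (h : (pvIdx xs bn)[m]? = some j) :
    ∃ jn : Nat, j = (jn : Int) ∧ jn < xs.length ∧ xs[jn]? = some bn ∧ (xs.take jn).count bn = m := by
  induction xs using List.reverseRecOn generalizing m j with
  | nil => simp [pvIdx, PySem.List.enumerate_nil] at h
  | append_singleton xs x ih =>
    have hsplit : pvIdx (xs ++ [x]) bn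
        = pvIdx xs bn ++ (if x = bn then [(xs.length : Int)] else []) := by
      unfold pvIdx
      rw [PySem.List.enumerate_append, List.filter_append, List.map_append]
      congr 1
      rw [PySem.List.enumerate_cons, PySem.List.enumerate_nil]
      by_cases hx : x = bn
      · simp [hx]
      · simp [hx]
    rw [hsplit] at h
    by_cases hm : m < (pvIdx xs bn).length
    · rw [List.getElem?_append_left hm] at h
      obtain ⟨jn, rfl, hlt, hget, hcnt⟩ := ih m j h
      refine ⟨jn, rfl, by simp; omega, ?_, ?_⟩
      · rw [List.getElem?_append_left hlt]; exact hget
      · rw [List.take_append_of_le_length (le_of_lt hlt)]; exact hcnt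
    · rw [List.getElem?_append_right (le_of_not_gt hm)] at h
      by_cases hx : x = bn
      · rw [if_pos hx] at h
        match hmk : m - (pvIdx xs bn).length, h with
        | 0, h =>
          simp only [List.getElem?_cons_zero, Option.some.injEq] at h
          have hmeq : m = (pvIdx xs bn).length := by omega
          refine ⟨xs.length, h.symm, by simp, ?_, ?_⟩
          · rw [List.getElem?_append_right (le_refl _)]
            simp [hx]
          · rw [List.take_append_of_le_length (le_refl _), List.take_length, hmeq,
                pvIdx_length]
        | (k+1), h => simp at h
      · rw [if_neg hx] at h; simp at h

theorem pvIdx_mem (xs : List String) (j : Nat) (h : j < xs.length) :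
    (j : Int) ∈ pvIdx xs (xs[j]) := by
  unfold pvIdx
  apply List.mem_map.mpr
  refine ⟨((j : Int), xs[j]), List.mem_filter.mpr ⟨?_, by simp⟩, rfl⟩
  exact (PySem.List.mem_enumerate_iff _ _ _).mpr ⟨j, h, by simp⟩

theorem pvGW_map_fst (bn : String) (i0 : Int) (t : List Int) :
    (pvGW (bn, i0 :: t)).map (·.1) = (i0 :: t).map Int.toNat := by
  unfold pvGW
  simp only [List.map_cons, List.map_map]
  congr 1
  · simp [PySem.List.pyGet?, PySem.List.pyIdx?]
  · show (PySem.List.enumerate t 2).map (fun q => q.2.toNat) = t.map Int.toNat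
    rw [show (fun (q : Int × Int) => q.2.toNat) = (Int.toNat ∘ (fun q => q.2)) from rfl,
        ← List.map_map, PySem.List.map_snd_enumerate]

theorem pvGroups_items (xs : List String) :
    ((PySem.List.enumerate xs).foldl (fun d p => d.modify p.2 [] (· ++ [p.1]))
      (PySem.Dict.empty : PySem.Dict String (List Int))).items
    = (PySem.Set.ofList xs).map (fun bn => (bn, pvIdx xs bn)) := by
  have hkeys : ((PySem.List.enumerate xs).foldl (fun d p => d.modify p.2 [] (· ++ [p.1]))
      (PySem.Dict.empty : PySem.Dict String (List Int))).keys = PySem.Set.ofList xs := by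
    have h := PySem.Dict.keys_foldl_modify_key (PySem.List.enumerate xs) (fun p => p.2)
      ([] : List Int) (fun _ p v => v ++ [p.1]) PySem.Dict.empty
    rw [PySem.List.map_snd_enumerate] at h
    rw [h]
    simp [PySem.Set.update_nil_left]
  have hnodup : ((PySem.List.enumerate xs).foldl (fun d p => d.modify p.2 [] (· ++ [p.1]))
      (PySem.Dict.empty : PySem.Dict String (List Int))).keys.Nodup := by
    rw [hkeys]; exact PySem.Set.nodup_ofList xs
  have hget : ∀ bn, ((PySem.List.enumerate xs).foldl (fun d p => d.modify p.2 [] (· ++ [p.1]))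
      (PySem.Dict.empty : PySem.Dict String (List Int))).getD bn [] = pvIdx xs bn := by
    intro bn
    have hswap : (PySem.List.enumerate xs).foldl (fun d p => d.modify p.2 [] (· ++ [p.1]))
        (PySem.Dict.empty : PySem.Dict String (List Int))
        = ((PySem.List.enumerate xs).map Prod.swap).foldl
            (fun d q => d.modify q.1 [] (· ++ [q.2])) PySem.Dict.empty := by
      rw [List.foldl_map]
      rfl
    rw [hswap, PySem.Dict.getD_foldl_modify_append, List.filter_map, List.map_map]
    have hpred : ((fun (p : String × Int) => p.1 == bn) ∘ Prod.swap) = (fun (p : Int × String) => p.2 == bn) := rfl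
    have hproj : ((fun (p : String × Int) => p.2) ∘ Prod.swap) = (fun (p : Int × String) => p.1) := rfl
    rw [hpred, hproj]
    simp [pvIdx]
  rw [PySem.Dict.items_eq_map_keys _ hnodup [], hkeys]
  exact List.map_congr_left (fun bn _ => by rw [hget])

theorem pvAlt_eq_fold (xs : List String) :
    segment_label_ordinals_py_alt xs
    = ((PySem.Set.ofList xs).map (fun bn => (bn, pvIdx xs bn))).foldl
        (fun res g => pvWrites (pvGW g) res) (List.replicate xs.length "") := by
  simp only [segment_label_ordinals_py_alt, PySem.List.slice_from_one]
  rw [pvGroups_items]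
  have hbody : (fun (res : List String) (g : String × List Int) =>
      (PySem.List.enumerate g.2.tail 2).foldl
        (fun r q => r.set q.2.toNat (pyOrdinal q.1 ++ " " ++ g.1))
        (res.set ((PySem.List.pyGet? g.2 0).getD 0).toNat g.1))
      = (fun res g => pvWrites (pvGW g) res) := by
    funext res g
    simp [pvWrites, pvGW, List.foldl_map]
  rw [hbody]

theorem pvAlt_eq_map (xs : List String) :
    segment_label_ordinals_py_alt xs = (PySem.List.enumerate xs).map
      (fun p => pvLabel (xs.take p.1.toNat) p.2) := by
  rw [pvAlt_eq_fold]
  apply List.ext_getElem?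
  intro i
  by_cases hi : i < xs.length
  · -- RHS at i
    rw [List.getElem?_map, PySem.List.getElem?_enumerate, List.getElem?_eq_getElem hi]
    simp only [Option.map_some, zero_add, Int.toNat_natCast]
    -- LHS at i
    have hbn : xs[i] ∈ PySem.Set.ofList xs :=
      (PySem.Set.mem_ofList xs xs[i]).mpr (List.getElem_mem hi)
    obtain ⟨S1, S2, hS⟩ := List.append_of_mem hbn
    have hnd : (PySem.Set.ofList xs).Nodup := PySem.Set.nodup_ofList xs
    rw [hS] at hnd
    have hbnS2 : xs[i] ∉ S2 :=
      (List.nodup_cons.mp (List.nodup_append.mp hnd).2.1).1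
    have hsub : ∀ b ∈ S2, b ∈ xs := by
      intro b hb
      exact (PySem.Set.mem_ofList xs b).mp (by rw [hS]; simp [hb])
    rw [hS, List.map_append, List.map_cons, List.foldl_append, List.foldl_cons]
    rw [pvFold_skip _ _ i ?hskip]
    case hskip =>
      intro g hg
      obtain ⟨b, hb, rfl⟩ := List.mem_map.mp hg
      obtain ⟨k, hk, hbk⟩ := List.mem_iff_getElem.mp (hsub b hb)
      have hne : pvIdx xs b ≠ [] := by
        have hmm := pvIdx_mem xs k hk
        rw [hbk] at hmm
        intro hnil; rw [hnil] at hmm; simp at hmm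
      obtain ⟨i0, t, hit⟩ := List.exists_cons_of_ne_nil hne
      intro hmemi
      rw [hit, pvGW_map_fst] at hmemi
      obtain ⟨a, ha, hai⟩ := List.mem_map.mp hmemi
      rw [← hit] at ha
      have ha0 : 0 ≤ a := pvIdx_nonneg xs b a ha
      have haa : a = (i : Int) := by omega
      rw [haa] at ha
      obtain ⟨m, hm⟩ := List.mem_iff_getElem?.mp ha
      obtain ⟨jn, hj, _, hget, _⟩ := pvIdx_getElem? xs b m _ hm
      have hji : jn = i := by exact_mod_cast hj.symm
      rw [hji, List.getElem?_eq_getElem hi] at hget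
      have hbb : xs[i] = b := by injection hget
      exact hbnS2 (hbb ▸ hb)
    -- the group of xs[i]
    have hidx : (i : Int) ∈ pvIdx xs (xs[i]) := pvIdx_mem xs i hi
    obtain ⟨m, hm⟩ := List.mem_iff_getElem?.mp hidx
    have hne : pvIdx xs (xs[i]) ≠ [] := by
      intro hnil; rw [hnil] at hidx; simp at hidx
    obtain ⟨i0, t, hit⟩ := List.exists_cons_of_ne_nil hne
    have hr1len : (List.foldl (fun res g => pvWrites (pvGW g) res)
        (List.replicate xs.length "")
        (S1.map (fun bn => (bn, pvIdx xs bn)))).length = xs.length := by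
      rw [pvFold_length]; simp
    have hpw : ((pvGW (xs[i], pvIdx xs (xs[i]))).map (·.1)).Pairwise (· < ·) := by
      rw [hit, pvGW_map_fst, ← hit]
      refine List.pairwise_map.mpr
        (List.Pairwise.imp_of_mem ?_ (pvIdx_pairwise xs (xs[i])))
      intro a b ha hb hab
      have ha0 := pvIdx_nonneg xs (xs[i]) a ha
      exact (Int.toNat_lt_toNat (by omega)).mpr hab
    obtain ⟨jn, hj, _, _, hcnt⟩ := pvIdx_getElem? xs (xs[i]) m _ hm
    have hji : jn = i := by exact_mod_cast hj.symm
    rw [hji] at hcnt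
    cases m with
    | zero =>
      have hi0 : i0 = (i : Int) := by
        rw [hit] at hm; simpa using hm
      rw [pvWrites_getElem?_inc _ 0 i xs[i] _ hpw ?_ (by rw [hr1len]; exact hi)]
      · rw [pvLabel, if_pos (by simp [hcnt])]
      · rw [hit]
        simp [pvGW, PySem.List.pyGet?, PySem.List.pyIdx?, hi0]
    | succ k =>
      have htk : t[k]? = some (i : Int) := by
        rw [hit] at hm; simpa using hm
      rw [pvWrites_getElem?_inc _ (k+1) i (pyOrdinal (2 + (k : Int)) ++ " " ++ xs[i]) _
            hpw ?_ (by rw [hr1len]; exact hi)]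
      · rw [pvLabel, if_neg (by omega)]
        rw [hcnt]
        have hc : ((k + 1 : Nat) : Int) + 1 = 2 + (k : Int) := by push_cast; ring
        rw [hc]
      · rw [hit]
        simp only [pvGW, List.getElem?_cons_succ, List.getElem?_map,
          PySem.List.getElem?_enumerate]
        simp
        exact ⟨(i : Int), htk, by simp⟩
  · -- out of range: both sides none
    rw [List.getElem?_eq_none, List.getElem?_eq_none]
    · simp [PySem.List.length_enumerate]; omega
    · rw [pvFold_length]; simp; omega

-- ===== VERDICT (by name: the statement is the Claim_ definition above) =====
theorem segment_label_ordinals_py_spec : Claim_equal_segment_label_ordinals_py := by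
  intro base_names _
  unfold Spec_segment_label_ordinals_py
  rw [pvA_eq_map, pvAlt_eq_map]
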